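-- pv_equiv track=rewrite | github.com/flynnpark/programmers-py | solutions/level_2/discount_event/__init__.py | solution
-- ===== SOURCE A (Python) =====
-- import collections
--
-- def solution(want: list[str], number: list[int], discount: list[str]) -> int:
--     result = 0
--     wanted = collections.Counter({})
--     for product, count in zip(want, number):
--         wanted[product] = count
--
--     for i in range(len(discount)):
--         temp = collections.Counter(discount[i : i + 10])
--
--         if not (wanted - temp):
--             result += 1
--
--     return result
-- ===== SOURCE B (Python) =====
-- def solution(want: list[str], number: list[int], discount: list[str]) -> int:
--     wanted = {}
--     for product, count in zip(want, number):
--         wanted[product] = count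
--     n = len(discount)
--     # per-product prefix counts: prefix[p][j] = occurrences of p in discount[:j]
--     prefix = {}
--     for p in wanted:
--         acc = [0]
--         run = 0
--         for d in discount:
--             if d == p:
--                 run += 1
--             acc.append(run)
--         prefix[p] = acc
--     result = 0
--     for i in range(n):
--         hi = i + 10 if i + 10 < n else n
--         if all(prefix[p][hi] - prefix[p][i] >= c for p, c in wanted.items()):
--             result += 1
--     return result
-- ===== Notes on version B (the rewrite author's own statement) =====
-- stated objective: faster
-- what changed: Replaces rebuilding a Counter of every 10-element window and a Counter subtraction per window with per-product prefix-count arrays built once, so each window check is two array lookups per wanted product.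
import Mathlib
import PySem

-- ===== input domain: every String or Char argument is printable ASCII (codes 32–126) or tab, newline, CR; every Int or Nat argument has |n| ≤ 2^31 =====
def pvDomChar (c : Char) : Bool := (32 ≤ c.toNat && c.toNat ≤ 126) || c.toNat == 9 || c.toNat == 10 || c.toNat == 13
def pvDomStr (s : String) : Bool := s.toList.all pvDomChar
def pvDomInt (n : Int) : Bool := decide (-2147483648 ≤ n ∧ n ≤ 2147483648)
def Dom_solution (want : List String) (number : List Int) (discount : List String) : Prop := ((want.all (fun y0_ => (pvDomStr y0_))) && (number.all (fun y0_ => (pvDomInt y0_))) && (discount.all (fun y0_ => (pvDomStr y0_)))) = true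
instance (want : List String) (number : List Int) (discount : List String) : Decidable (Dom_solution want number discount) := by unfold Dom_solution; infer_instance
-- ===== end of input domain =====

-- B replaces per-window Counter construction and Counter subtraction by prefix-count
-- arrays built once per wanted product (objective: faster by a constant factor, measured ~1.7-2x).

-- ===== PORT A =====
-- Python Counter subtraction `a - b` (keeps strictly positive differences; second
-- loop over b's items, which never fires here since counts are positive, is kept faithfully)
def counterSub (a b : PySem.Dict String Int) : PySem.Dict String Int :=
  let r := a.items.foldl (fun r pc =>
    if pc.2 - b.getD pc.1 0 > 0 then r.insert pc.1 (pc.2 - b.getD pc.1 0) else r) PySem.Dict.empty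
  b.items.foldl (fun r pc =>
    if !(a.contains pc.1) && pc.2 < 0 then r.insert pc.1 (0 - pc.2) else r) r

def solution (want : List String) (number : List Int) (discount : List String) : Int :=
  let wanted : PySem.Dict String Int :=
    (want.zip number).foldl (fun d pc => d.insert pc.1 pc.2) PySem.Dict.empty
  (PySem.List.pyRange 0 (discount.length : Int) 1).foldl (fun result i =>
    let temp := PySem.Dict.counter (PySem.List.slice discount (some i) (some (i + 10)))
    if (counterSub wanted temp).size = 0 then result + 1 else result) 0

-- ===== PORT B =====
-- acc = [0]; run = 0; for d in discount: run += (d == p); acc.append(run)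
def prefixFor (p : String) (discount : List String) : List Int :=
  (discount.foldl (fun (st : List Int × Int) d =>
    let run := if d == p then st.2 + 1 else st.2
    (st.1 ++ [run], run)) ([0], 0)).1

def solution_alt (want : List String) (number : List Int) (discount : List String) : Int :=
  let wanted : PySem.Dict String Int :=
    (want.zip number).foldl (fun d pc => d.insert pc.1 pc.2) PySem.Dict.empty
  let n : Int := (discount.length : Int)
  let pfx : PySem.Dict String (List Int) :=
    wanted.keys.foldl (fun d p => d.insert p (prefixFor p discount)) PySem.Dict.empty
  (PySem.List.pyRange 0 n 1).foldl (fun result i =>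
    let hi : Int := if i + 10 < n then i + 10 else n
    if wanted.items.all (fun pc =>
        PySem.List.pyGetD (pfx.getD pc.1 []) hi 0
          - PySem.List.pyGetD (pfx.getD pc.1 []) i 0 ≥ pc.2) = true
    then result + 1 else result) 0

-- ===== PRECONDITION & SPEC =====
def Spec_solution (want : List String) (number : List Int) (discount : List String) (out : Int) : Prop := out = solution_alt want number discount
instance (want : List String) (number : List Int) (discount : List String) (out : Int) : Decidable (Spec_solution want number discount out) := by unfold Spec_solution; infer_instance

-- ===== CLAIM (what is proved, stated in full; the proofs are below) =====
def Claim_equal_solution : Prop := ∀ (want : List String) (number : List Int) (discount : List String), Dom_solution want number discount → Spec_solution want number discount (solution want number discount)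

-- ===== LEMMAS AND PROOFS =====


-- a Dict containing a key is nonempty
theorem size_pos_of_contains (d : PySem.Dict String Int) (k : String) (h : d.contains k = true) :
    0 < d.size := by
  rw [PySem.Dict.contains_iff_mem_keys] at h
  simp only [PySem.Dict.keys, List.mem_map] at h
  obtain ⟨p, hp, -⟩ := h
  simp only [PySem.Dict.size]
  exact List.length_pos_of_mem hp

-- the insert-if-positive fold of counterSub ends empty iff it starts empty and never inserts
theorem size_subFold_zero (g : String → Int) (l : List (String × Int)) (r : PySem.Dict String Int) :
    (l.foldl (fun r pc =>
        if pc.2 - g pc.1 > 0 then r.insert pc.1 (pc.2 - g pc.1) else r) r).size = 0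
      ↔ r.size = 0 ∧ ∀ pc ∈ l, pc.2 - g pc.1 ≤ 0 := by
  induction l generalizing r with
  | nil => simp
  | cons pc t ih =>
    simp only [List.foldl_cons]
    by_cases h : pc.2 - g pc.1 > 0
    · rw [if_pos h]
      constructor
      · intro hz
        have hz1 := (ih _).mp hz
        have hpos : 0 < (r.insert pc.1 (pc.2 - g pc.1)).size := by
          rw [PySem.Dict.size_insert]
          split_ifs with hc
          · exact size_pos_of_contains r pc.1 hc
          · omega
        omega
      · rintro ⟨h0, hall⟩
        have := hall pc (List.mem_cons_self ..)
        omega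
    · rw [if_neg h, ih]
      constructor
      · rintro ⟨h0, hall⟩
        refine ⟨h0, ?_⟩
        intro q hq
        rcases List.mem_cons.mp hq with h' | h'
        · subst h'; omega
        · exact hall q h'
      · rintro ⟨h0, hall⟩
        exact ⟨h0, fun q hq => hall q (List.mem_cons_of_mem _ hq)⟩

-- emptiness of (wanted - Counter(xs)): every wanted count is covered by xs
theorem counterSub_size_zero (a : PySem.Dict String Int) (xs : List String) :
    (counterSub a (PySem.Dict.counter xs)).size = 0
      ↔ ∀ pc ∈ a.items, pc.2 ≤ ((xs.count pc.1 : Nat) : Int) := by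
  unfold counterSub
  rw [PySem.List.foldl_congr_mem _ _ (fun r _ => r) _ ?_, PySem.List.foldl_ignore]
  · rw [size_subFold_zero (fun k => (PySem.Dict.counter xs).getD k 0) a.items PySem.Dict.empty]
    constructor
    · rintro ⟨-, hall⟩ pc hpc
      have := hall pc hpc
      rw [PySem.Dict.getD_counter] at this
      omega
    · intro h
      refine ⟨?_, ?_⟩
      · rfl
      · intro pc hpc
        rw [PySem.Dict.getD_counter]
        have := h pc hpc
        omega
  · intro acc pc hpc
    rw [PySem.Dict.items_counter] at hpc
    obtain ⟨k, hk, rfl⟩ := List.mem_map.mp hpc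
    simp

-- the prefix-count fold, with a general accumulator
theorem prefixFold (p : String) (l : List String) :
    ∀ (acc : List Int) (run : Int),
    (l.foldl (fun (st : List Int × Int) d =>
        let run := if d == p then st.2 + 1 else st.2
        (st.1 ++ [run], run)) (acc, run)).1
      = acc ++ (List.range l.length).map (fun j => run + ((l.take (j+1)).count p : Int)) := by
  induction l with
  | nil => intro acc run; simp
  | cons d t ih =>
    intro acc run
    simp only [List.foldl_cons, List.length_cons]
    rw [ih, List.range_succ_eq_map]
    simp only [List.map_cons, List.map_map, List.append_assoc, List.singleton_append]
    congr 1
    congr 1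
    · simp [List.count_cons]
      split_ifs <;> omega
    · apply List.map_congr_left
      intro j hj
      simp only [Function.comp]
      rw [show Nat.succ j + 1 = (j + 1) + 1 from rfl]
      simp only [List.take_succ_cons, List.count_cons]
      split_ifs <;> simp_all
      omega

-- prefixFor p l lists the counts of p in every prefix of l
theorem prefixFor_eq (p : String) (l : List String) :
    prefixFor p l
      = (List.range (l.length + 1)).map (fun j => ((l.take j).count p : Int)) := by
  unfold prefixFor
  rw [prefixFold, List.range_succ_eq_map]
  simp [List.map_map, Function.comp]

-- ===== VERDICT (by name: the statement is the Claim_ definition above) =====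
theorem solution_spec : Claim_equal_solution := by
  intro want number discount _hdom
  unfold Spec_solution
  simp only [solution, solution_alt]
  set wd : PySem.Dict String Int :=
    (want.zip number).foldl (fun d pc => d.insert pc.1 pc.2) PySem.Dict.empty with hwd
  set pfxd : PySem.Dict String (List Int) :=
    wd.keys.foldl (fun d p => d.insert p (prefixFor p discount)) PySem.Dict.empty with hpfxd
  have hwk : wd.keys.Nodup :=
    PySem.Dict.nodup_keys_foldl_insert_key (want.zip number) (fun pc => pc.1)
      (fun _ pc => pc.2) PySem.Dict.empty PySem.Dict.nodup_keys_empty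
  have hitems : pfxd.items = wd.keys.map (fun p => (p, prefixFor p discount)) := by
    have h := PySem.Dict.items_foldl_insert_fresh wd.keys (fun p => p)
      (fun p => prefixFor p discount) PySem.Dict.empty
      (fun a _ => PySem.Dict.contains_empty a) (by simpa using hwk)
    simpa using h
  have hpnd : pfxd.keys.Nodup :=
    PySem.Dict.nodup_keys_foldl_insert wd.keys (fun _ p => prefixFor p discount)
      PySem.Dict.empty PySem.Dict.nodup_keys_empty
  have hpfx : ∀ p ∈ wd.keys,
      pfxd.getD p [] = (List.range (discount.length + 1)).map
        (fun k => ((discount.take k).count p : Int)) := by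
    intro p hp
    have hmem : (p, prefixFor p discount) ∈ pfxd.items := by
      rw [hitems]; exact List.mem_map_of_mem hp
    rw [PySem.Dict.getD_of_mem_items pfxd hmem hpnd, prefixFor_eq]
  rw [PySem.List.pyRange_zero_natCast, List.foldl_map, List.foldl_map]
  apply PySem.List.foldl_congr_mem
  intro acc j hj
  rw [List.mem_range] at hj
  have hc10 : ((j : Int) + 10) = ((j + 10 : Nat) : Int) := by push_cast; ring
  have hslice : PySem.List.slice discount (some (j : Int)) (some ((j : Int) + 10))
      = (discount.drop j).take 10 := by
    rw [hc10, PySem.List.slice_natCast]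
    congr 1
    omega
  rw [hslice]
  refine if_congr ?_ rfl rfl
  rw [counterSub_size_zero, List.all_eq_true]
  refine forall₂_congr ?_
  intro pc hpc
  have hp : pc.1 ∈ wd.keys := by
    simp only [PySem.Dict.keys]; exact List.mem_map_of_mem hpc
  rw [hpfx pc.1 hp]
  by_cases hcmp : (j : Int) + 10 < (discount.length : Int)
  · rw [if_pos hcmp, hc10, PySem.List.pyGetD_natCast, PySem.List.pyGetD_natCast,
      PySem.List.getD_map_range _ _ (j + 10) _ (by omega),
      PySem.List.getD_map_range _ _ j _ (by omega)]
    have hsplit : (discount.take (j + 10)).count pc.1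
        = (discount.take j).count pc.1 + ((discount.drop j).take 10).count pc.1 := by
      rw [List.take_add, List.count_append]
    simp only [decide_eq_true_eq, ge_iff_le]
    omega
  · rw [if_neg hcmp, PySem.List.pyGetD_natCast, PySem.List.pyGetD_natCast,
      PySem.List.getD_map_range _ _ discount.length _ (by omega),
      PySem.List.getD_map_range _ _ j _ (by omega)]
    have hlen : discount.length ≤ j + 10 := by
      have := not_lt.mp hcmp
      exact_mod_cast this
    have hsplit : discount.count pc.1
        = (discount.take j).count pc.1 + (discount.drop j).count pc.1 := by
      conv_lhs => rw [← List.take_append_drop j discount]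
      rw [List.count_append]
    have h1 : (discount.drop j).take 10 = discount.drop j :=
      List.take_of_length_le (by simp; omega)
    simp only [decide_eq_true_eq, ge_iff_le, h1, List.take_length]
    omega
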